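-- pv_equiv track=rewrite | github.com/mohammadfaiizan/ProjectI | DSA/Problem/Graph/09_Bipartite_Graphs_Matching/Advanced_Matching_Problems.py | capacity_constrained_matching
-- ===== SOURCE A (Python) =====
-- from typing import List, Dict, Set, Tuple, Optional
-- from collections import defaultdict, deque
--
-- def capacity_constrained_matching(edges: List[Tuple[int, int]],
--                                 left_capacities: List[int],
--                                 right_capacities: List[int]) -> List[Tuple[int, int]]:
--     """
--     Approach 8: Capacity Constrained Bipartite Matching
--
--     Each vertex can be matched to multiple vertices up to its capacity.
--
--     Time: O(V²E), Space: O(V + E)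
--     """
--     # Build adjacency list
--     adj = defaultdict(list)
--     for u, v in edges:
--         adj[u].append(v)
--
--     # Track current matching count for each vertex
--     left_matched = [0] * len(left_capacities)
--     right_matched = [0] * len(right_capacities)
--
--     matching = []
--
--     def dfs(u: int, visited: Set[int]) -> bool:
--         for v in adj[u]:
--             if v not in visited:
--                 visited.add(v)
--
--                 # Check if v has capacity
--                 if right_matched[v] < right_capacities[v]:
--                     matching.append((u, v))
--                     left_matched[u] += 1
--                     right_matched[v] += 1
--                     return True
--
--                 # Try to find augmenting path through v's current matches
--                 # This would require more complex implementation
--                 # For simplicity, just check direct capacity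
--
--     # Try to match each left vertex up to its capacity
--     for u in range(len(left_capacities)):
--         while left_matched[u] < left_capacities[u]:
--             visited = set()
--             if not dfs(u, visited):
--                 break  # No more augmenting paths
--
--     return matching
-- ===== SOURCE B (Python) =====
-- from typing import List, Tuple
-- from collections import defaultdict
--
-- def capacity_constrained_matching(edges: List[Tuple[int, int]],
--                                 left_capacities: List[int],
--                                 right_capacities: List[int]) -> List[Tuple[int, int]]:
--     # One greedy pass per left vertex: take min(remaining left, remaining right)
--     # copies of each edge at once, instead of rescanning the adjacency list per unit.
--     adj = defaultdict(list)
--     for u, v in edges: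
--         adj[u].append(v)
--
--     right_rem = list(right_capacities)
--     matching = []
--     for u in range(len(left_capacities)):
--         rem = left_capacities[u]
--         for v in adj[u]:
--             if rem <= 0:
--                 break
--             take = min(rem, right_rem[v])
--             if take > 0:
--                 matching.extend([(u, v)] * take)
--                 right_rem[v] -= take
--                 rem -= take
--     return matching
-- ===== Notes on version B (the rewrite author's own statement) =====
-- stated objective: faster
-- what changed: A repeatedly re-runs a scan (dfs) over the left vertex's adjacency list, matching one unit per full rescan; B makes a single pass over each adjacency list, taking min(remaining left capacity, remaining right capacity) copies of each edge at once with a remaining-capacity array.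
-- outside the precondition, e.g. on capacity_constrained_matching([(0, 0), (0, 5)], [1], [1]): A returns [(0, 0)], B returns [(0, 0)]
import Mathlib
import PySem

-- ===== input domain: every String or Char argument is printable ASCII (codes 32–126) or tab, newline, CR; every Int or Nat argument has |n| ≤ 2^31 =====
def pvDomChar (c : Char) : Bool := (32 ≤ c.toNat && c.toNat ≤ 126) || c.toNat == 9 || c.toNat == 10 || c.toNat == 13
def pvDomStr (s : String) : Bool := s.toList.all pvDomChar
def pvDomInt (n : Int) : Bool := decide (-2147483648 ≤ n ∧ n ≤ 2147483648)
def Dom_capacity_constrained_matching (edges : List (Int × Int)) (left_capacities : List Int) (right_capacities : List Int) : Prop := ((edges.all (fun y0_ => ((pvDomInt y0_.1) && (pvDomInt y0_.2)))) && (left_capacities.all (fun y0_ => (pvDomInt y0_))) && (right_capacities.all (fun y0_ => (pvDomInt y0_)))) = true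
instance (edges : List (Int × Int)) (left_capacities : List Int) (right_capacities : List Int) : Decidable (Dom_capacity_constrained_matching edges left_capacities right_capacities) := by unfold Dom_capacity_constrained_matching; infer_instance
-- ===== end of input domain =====

-- ===== PORT A =====
-- B replaces A's one-unit-per-adjacency-rescan dfs loop by a single greedy pass per left
-- vertex taking min(remaining left, remaining right) copies of each edge at once.

-- shared by both Pythons: list indexing xs[i] (possibly negative) as a total read/write;
-- exact wherever Pre_ guarantees the index is in range (PySem.List.pyGet?/pySetD)
def getAt (xs : List Int) (i : Int) : Int := (PySem.List.pyGet? xs i).getD 0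
def setAt (xs : List Int) (i : Int) (x : Int) : List Int := PySem.List.pySetD xs i x

-- shared by both Pythons: adj = defaultdict(list); for u, v in edges: adj[u].append(v)
def buildAdj (edges : List (Int × Int)) : PySem.Dict Int (List Int) :=
  edges.foldl (fun d p => d.modify p.1 [] (· ++ [p.2])) PySem.Dict.empty

-- A's dfs(u, visited): scan adj[u], skip visited, match the first v with spare capacity
def dfsA (adjU : List Int) (visited : PySem.Set Int) (rm rc : List Int) :
    Option (List Int × Int) :=
  match adjU with
  | [] => none
  | v :: rest =>
    if PySem.Set.contains visited v then dfsA rest visited rm rc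
    else
      let visited' := PySem.Set.add visited v
      if getAt rm v < getAt rc v then some (setAt rm v (getAt rm v + 1), v)
      else dfsA rest visited' rm rc

-- A's 'while left_matched[u] < left_capacities[u]' loop (fuel bounds the iteration count;
-- the loop condition is re-checked every step, so surplus fuel is unobservable)
def whileA (adjU : List Int) (u : Int) (lc rc : List Int) :
    Nat → List Int → List Int → List (Int × Int) → List Int × List Int × List (Int × Int)
  | 0, lmL, rm, matching => (lmL, rm, matching)
  | fuel + 1, lmL, rm, matching =>
    if getAt lmL u < getAt lc u then
      match dfsA adjU PySem.Set.empty rm rc with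
      | some (rm', v) => whileA adjU u lc rc fuel
          (setAt lmL u (getAt lmL u + 1)) rm' (matching ++ [(u, v)])
      | none => (lmL, rm, matching)
    else (lmL, rm, matching)

def capacity_constrained_matching (edges : List (Int × Int)) (left_capacities : List Int) (right_capacities : List Int) : List (Int × Int) :=
  let adj := buildAdj edges
  let res := (PySem.List.pyRange 0 left_capacities.length 1).foldl
    (fun st u => whileA (adj.getD u []) u left_capacities right_capacities
        ((getAt left_capacities u).toNat + 1) st.1 st.2.1 st.2.2)
    (List.replicate left_capacities.length (0 : Int),
     List.replicate right_capacities.length (0 : Int), ([] : List (Int × Int)))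
  res.2.2

-- ===== PORT B =====
-- B's inner loop: one pass over adj[u], taking min(rem, right_rem[v]) copies at once
def binner (u : Int) (adjU : List Int) (rem : Int) (rr : List Int)
    (matching : List (Int × Int)) : List Int × List (Int × Int) :=
  match adjU with
  | [] => (rr, matching)
  | v :: rest =>
    if rem ≤ 0 then (rr, matching)
    else
      let take := min rem (getAt rr v)
      if 0 < take then
        binner u rest (rem - take) (setAt rr v (getAt rr v - take))
          (matching ++ List.replicate take.toNat (u, v))
      else binner u rest rem rr matching

def capacity_constrained_matching_alt (edges : List (Int × Int)) (left_capacities : List Int) (right_capacities : List Int) : List (Int × Int) :=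
  let adj := buildAdj edges
  let res := (PySem.List.pyRange 0 left_capacities.length 1).foldl
    (fun st u => binner u (adj.getD u []) (getAt left_capacities u) st.1 st.2)
    (right_capacities, ([] : List (Int × Int)))
  res.2

-- ===== PRECONDITION & SPEC =====
-- Pre_ requires a valid Python index into right_capacities for the right endpoint of
-- every edge the greedy can touch (left endpoint indexes a positive left capacity);
-- outside it A (and B) can raise IndexError. It is slightly narrower than the raising
-- set: an out-of-range right endpoint that the scan abandons early (left capacity
-- exhausted first) is also excluded although A still returns there.
def Pre_capacity_constrained_matching (edges : List (Int × Int)) (left_capacities : List Int) (right_capacities : List Int) : Prop :=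
  ∀ p ∈ edges, 0 ≤ p.1 → p.1 < left_capacities.length → 0 < getAt left_capacities p.1 →
    PySem.Raise.InRange right_capacities.length p.2
instance (edges : List (Int × Int)) (left_capacities : List Int) (right_capacities : List Int) : Decidable (Pre_capacity_constrained_matching edges left_capacities right_capacities) := by unfold Pre_capacity_constrained_matching; infer_instance

def pvWitness_capacity_constrained_matching : (List (Int × Int)) × List Int × List Int :=
  ([((0 : Int), (0 : Int)), (1, 1), (0, 1)], [2, 1], [1, 2])

def Spec_capacity_constrained_matching (edges : List (Int × Int)) (left_capacities : List Int) (right_capacities : List Int) (out : List (Int × Int)) : Prop := out = capacity_constrained_matching_alt edges left_capacities right_capacities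
instance (edges : List (Int × Int)) (left_capacities : List Int) (right_capacities : List Int) (out : List (Int × Int)) : Decidable (Spec_capacity_constrained_matching edges left_capacities right_capacities out) := by unfold Spec_capacity_constrained_matching; infer_instance

-- ===== CLAIM (what is proved, stated in full; the proofs are below) =====
def Claim_equal_capacity_constrained_matching : Prop := ∀ (edges : List (Int × Int)) (left_capacities : List Int) (right_capacities : List Int), Dom_capacity_constrained_matching edges left_capacities right_capacities → Pre_capacity_constrained_matching edges left_capacities right_capacities → Spec_capacity_constrained_matching edges left_capacities right_capacities (capacity_constrained_matching edges left_capacities right_capacities)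

-- ===== LEMMAS AND PROOFS =====

-- normalised Nat index of Python index i into a list of length n
def vIdx (n : Nat) (i : Int) : Nat := if 0 ≤ i then i.toNat else n - (-i).toNat

theorem vIdx_lt {n : Nat} {i : Int} (h : PySem.Raise.InRange n i) : vIdx n i < n := by
  rcases h with ⟨h1, h2⟩; unfold vIdx; split <;> omega

theorem pyIdx?_eq {n : Nat} {i : Int} (h : PySem.Raise.InRange n i) :
    PySem.List.pyIdx? n i = some (vIdx n i) := by
  rcases h with ⟨h1, h2⟩
  simp only [PySem.List.pyIdx?, vIdx]
  split <;> simp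

theorem getAt_eq {xs : List Int} {i : Int} (h : PySem.Raise.InRange xs.length i) :
    getAt xs i = xs[vIdx xs.length i]'(vIdx_lt h) := by
  simp [getAt, PySem.List.pyGet?, pyIdx?_eq h, List.getElem?_eq_getElem (vIdx_lt h)]

theorem getAt_eq? {xs : List Int} {i : Int} (h : PySem.Raise.InRange xs.length i) :
    getAt xs i = (xs[vIdx xs.length i]?).getD 0 := by
  simp [getAt, PySem.List.pyGet?, pyIdx?_eq h]

theorem setAt_eq {xs : List Int} {i : Int} (x : Int) (h : PySem.Raise.InRange xs.length i) :
    setAt xs i x = xs.set (vIdx xs.length i) x := by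
  simp [setAt, PySem.List.pySetD, PySem.List.pySet?, pyIdx?_eq h]

theorem length_setAt (xs : List Int) (i : Int) (x : Int) :
    (setAt xs i x).length = xs.length := by
  simp [setAt, PySem.List.pySetD, PySem.List.pySet?]
  cases h : PySem.List.pyIdx? xs.length i <;> simp

theorem getAt_setAt {xs : List Int} {i j : Int} (x : Int)
    (hi : PySem.Raise.InRange xs.length i) (hj : PySem.Raise.InRange xs.length j) :
    getAt (setAt xs i x) j =
      if vIdx xs.length i = vIdx xs.length j then x else getAt xs j := by
  have hi' : PySem.Raise.InRange (setAt xs i x).length j := by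
    rw [length_setAt]; exact hj
  rw [getAt_eq? hi', getAt_eq? hj, setAt_eq x hi]
  simp only [List.length_set, List.getElem?_set]
  have hjlt := vIdx_lt hj
  by_cases hv : vIdx xs.length i = vIdx xs.length j
  · simp [hv, hjlt]
  · simp [hv]

theorem getAt_setAt_self {xs : List Int} {i : Int} (x : Int)
    (h : PySem.Raise.InRange xs.length i) : getAt (setAt xs i x) i = x := by
  rw [getAt_setAt x h h]; simp

theorem setAt_setAt {xs : List Int} {i : Int} (x y : Int)
    (h : PySem.Raise.InRange xs.length i) :
    setAt (setAt xs i x) i y = setAt xs i y := by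
  have h' : PySem.Raise.InRange (setAt xs i x).length i := by rw [length_setAt]; exact h
  rw [setAt_eq y h', setAt_eq x h, setAt_eq y h]
  simp [List.set_set]

theorem setAt_getAt_self {xs : List Int} {i : Int}
    (h : PySem.Raise.InRange xs.length i) : setAt xs i (getAt xs i) = xs := by
  rw [setAt_eq _ h, getAt_eq h, List.set_getElem_self]

theorem getAt_zip {rc rm : List Int} {i : Int} (hlen : rm.length = rc.length)
    (h : PySem.Raise.InRange rc.length i) :
    getAt (List.zipWith (· - ·) rc rm) i = getAt rc i - getAt rm i := by
  have hz : (List.zipWith (· - ·) rc rm).length = rc.length := by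
    simp [List.length_zipWith, hlen]
  have h1 : PySem.Raise.InRange (List.zipWith (· - ·) rc rm).length i := by rw [hz]; exact h
  have h2 : PySem.Raise.InRange rm.length i := by rw [hlen]; exact h
  rw [getAt_eq h1, getAt_eq h, getAt_eq h2]
  rw [List.getElem_zipWith]
  congr 2 <;> simp [hz, hlen]

theorem zip_setAt {rc rm : List Int} {i : Int} (c : Int) (hlen : rm.length = rc.length)
    (h : PySem.Raise.InRange rc.length i) :
    List.zipWith (· - ·) rc (setAt rm i (getAt rm i + c)) =
      setAt (List.zipWith (· - ·) rc rm) i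
        (getAt (List.zipWith (· - ·) rc rm) i - c) := by
  have hz : (List.zipWith (· - ·) rc rm).length = rc.length := by
    simp [List.length_zipWith, hlen]
  have h1 : PySem.Raise.InRange (List.zipWith (· - ·) rc rm).length i := by rw [hz]; exact h
  have h2 : PySem.Raise.InRange rm.length i := by rw [hlen]; exact h
  rw [setAt_eq _ h2, setAt_eq _ h1, getAt_zip hlen h, getAt_eq? h, getAt_eq? h2]
  have hv : vIdx rm.length i = vIdx rc.length i := by rw [hlen]
  have hv2 : vIdx (List.zipWith (· - ·) rc rm).length i = vIdx rc.length i := by rw [hz]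
  rw [hv, hv2]
  have hlt : vIdx rc.length i < rc.length := vIdx_lt h
  apply List.ext_getElem
  · simp [List.length_zipWith, hlen]
  · intro k hk1 hk2
    have hklt : k < rm.length := by
      simp only [List.length_zipWith, List.length_set, hlen, min_self] at hk1 ⊢; omega
    simp only [List.getElem_zipWith, List.getElem_set]
    by_cases hkv : vIdx rc.length i = k
    · subst hkv
      simp only [List.getElem?_eq_getElem (by omega : vIdx rc.length i < rc.length),
          List.getElem?_eq_getElem (by rw [hlen]; omega : vIdx rc.length i < rm.length),
          Option.getD_some, if_true]
      ring
    · simp [hkv]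

theorem find?_congr_mem {l : List Int} {p q : Int → Bool}
    (h : ∀ x ∈ l, p x = q x) : l.find? p = l.find? q := by
  induction l with
  | nil => rfl
  | cons v rest ih =>
    simp only [List.find?]
    rw [h v (by simp)]
    split
    · rfl
    · exact ih (fun x hx => h x (by simp [hx]))

theorem dfsA_spec {rm rc : List Int} : ∀ (l : List Int) (visited : PySem.Set Int),
    (∀ w ∈ visited, ¬ getAt rm w < getAt rc w) →
    dfsA l visited rm rc =
      (l.find? (fun v => getAt rm v < getAt rc v)).map
        (fun v => (setAt rm v (getAt rm v + 1), v)) := by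
  intro l
  induction l with
  | nil => intro _ _; rfl
  | cons v rest ih =>
    intro visited hvis
    simp only [dfsA, List.find?]
    by_cases hc : PySem.Set.contains visited v
    · have hv : ¬ getAt rm v < getAt rc v := hvis v ((PySem.Set.contains_iff _ _).mp hc)
      rw [if_pos hc, decide_eq_false hv, ih visited hvis]
    · rw [if_neg hc]
      by_cases hcap : getAt rm v < getAt rc v
      · rw [if_pos hcap, decide_eq_true hcap]; rfl
      · rw [if_neg hcap, decide_eq_false hcap]
        exact ih _ (fun w hw => by
          rcases (PySem.Set.mem_add _ _ _).mp hw with h | h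
          · exact hvis w h
          · subst h; exact hcap)

theorem binner_nonpos {u rem : Int} {rr : List Int} {m : List (Int × Int)}
    (l : List Int) (h : rem ≤ 0) : binner u l rem rr m = (rr, m) := by
  cases l with
  | nil => rfl
  | cons v rest => simp [binner, h]

theorem binner_nofind {u : Int} : ∀ (l : List Int) (rem : Int) (rr : List Int)
    (m : List (Int × Int)), l.find? (fun v => 0 < getAt rr v) = none →
    binner u l rem rr m = (rr, m) := by
  intro l
  induction l with
  | nil => intro _ _ _ _; rfl
  | cons v rest ih =>
    intro rem rr m hf
    simp only [List.find?] at hf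
    by_cases hv : 0 < getAt rr v
    · rw [decide_eq_true hv] at hf; cases hf
    · rw [decide_eq_false hv] at hf
      simp only [binner]
      split
      · rfl
      · rw [if_neg (by omega), ih rem rr m hf]

theorem binner_step {u : Int} : ∀ (l : List Int) (rem : Int) (rr : List Int)
    (m : List (Int × Int)) (w : Int), 0 < rem →
    l.find? (fun v => 0 < getAt rr v) = some w →
    (∀ v ∈ l, PySem.Raise.InRange rr.length v) →
    binner u l rem rr m =
      binner u l (rem - 1) (setAt rr w (getAt rr w - 1)) (m ++ [(u, w)]) := by
  intro l
  induction l with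
  | nil => intro rem rr m w _ hf _; cases hf
  | cons v rest ih =>
    intro rem rr m w hrem hf hV
    have hvv : PySem.Raise.InRange rr.length v := hV v (by simp)
    simp only [List.find?] at hf
    by_cases hv : 0 < getAt rr v
    · rw [decide_eq_true hv] at hf
      have hw : w = v := by cases hf; rfl
      subst hw
      have hself : getAt (setAt rr w (getAt rr w - 1)) w = getAt rr w - 1 :=
        getAt_setAt_self _ hvv
      simp only [binner, if_neg (show ¬ rem ≤ 0 by omega),
        if_pos (show 0 < min rem (getAt rr w) by omega), hself]
      by_cases h1 : rem - 1 ≤ 0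
      · have htake : min rem (getAt rr w) = 1 := by omega
        rw [if_pos h1, htake, binner_nonpos _ (h1 : rem - 1 ≤ 0)]
        norm_num
      · rw [if_neg h1]
        by_cases hk1 : 0 < getAt rr w - 1
        · rw [if_pos (show 0 < min (rem - 1) (getAt rr w - 1) by omega)]
          have htake' : min (rem - 1) (getAt rr w - 1) = min rem (getAt rr w) - 1 := by
            omega
          rw [htake', setAt_setAt _ _ hvv]
          have ht : 0 < min rem (getAt rr w) := by omega
          have harith : getAt rr w - 1 - (min rem (getAt rr w) - 1)
              = getAt rr w - min rem (getAt rr w) := by omega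
          have hrm : rem - 1 - (min rem (getAt rr w) - 1)
              = rem - min rem (getAt rr w) := by omega
          have hrep : List.replicate (min rem (getAt rr w)).toNat (u, w)
              = (u, w) :: List.replicate (min rem (getAt rr w) - 1).toNat (u, w) := by
            have h2 : (min rem (getAt rr w)).toNat
                = (min rem (getAt rr w) - 1).toNat + 1 := by omega
            rw [h2, List.replicate_succ]
          rw [harith, hrm, hrep]
          simp
        · rw [if_neg (show ¬ 0 < min (rem - 1) (getAt rr w - 1) by omega)]
          have htake : min rem (getAt rr w) = 1 := by omega
          rw [htake]
          norm_num
    · rw [decide_eq_false hv] at hf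
      have hwmem : w ∈ rest := List.mem_of_find?_eq_some hf
      have hww : PySem.Raise.InRange rr.length w := hV w (by simp [hwmem])
      have hwpos : 0 < getAt rr w := by
        have := List.find?_some hf
        simpa using this
      have hVr : ∀ x ∈ rest, PySem.Raise.InRange rr.length x :=
        fun x hx => hV x (by simp [hx])
      -- aliasing of the two cells is impossible: their values differ
      have hne : vIdx rr.length w ≠ vIdx rr.length v := by
        intro hEq
        rw [getAt_eq? hww] at hwpos
        rw [getAt_eq? hvv] at hv
        rw [hEq] at hwpos
        omega
      have hset : getAt (setAt rr w (getAt rr w - 1)) v = getAt rr v := by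
        rw [getAt_setAt _ hww hvv, if_neg hne]
      have hstep : binner u (v :: rest) rem rr m = binner u rest rem rr m := by
        simp only [binner]
        rw [if_neg (show ¬ rem ≤ 0 by omega),
          if_neg (show ¬ 0 < min rem (getAt rr v) by omega)]
      by_cases h1 : rem - 1 ≤ 0
      · rw [hstep, binner_nonpos _ h1, ih rem rr m w hrem hf hVr,
          binner_nonpos _ (by omega)]
      · have hstep' : binner u (v :: rest) (rem - 1) (setAt rr w (getAt rr w - 1))
            (m ++ [(u, w)]) = binner u rest (rem - 1) (setAt rr w (getAt rr w - 1))
            (m ++ [(u, w)]) := by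
          simp only [binner]
          rw [if_neg h1, hset,
            if_neg (show ¬ 0 < min (rem - 1) (getAt rr v) by omega)]
        rw [hstep, hstep', ih rem rr m w hrem hf hVr]

theorem whileA_eq {lc rc : List Int} {u : Int}
    (hu : PySem.Raise.InRange lc.length u)
    (adjU : List Int) (hV : ∀ v ∈ adjU, PySem.Raise.InRange rc.length v) :
    ∀ (fuel : Nat) (lmL rm : List Int) (m : List (Int × Int)),
    rm.length = rc.length → lmL.length = lc.length →
    getAt lc u - getAt lmL u ≤ (fuel : Int) →
    (whileA adjU u lc rc fuel lmL rm m).2.2 =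
        (binner u adjU (getAt lc u - getAt lmL u) (List.zipWith (· - ·) rc rm) m).2 ∧
    List.zipWith (· - ·) rc (whileA adjU u lc rc fuel lmL rm m).2.1 =
        (binner u adjU (getAt lc u - getAt lmL u) (List.zipWith (· - ·) rc rm) m).1 ∧
    (whileA adjU u lc rc fuel lmL rm m).2.1.length = rm.length ∧
    (∃ c, (whileA adjU u lc rc fuel lmL rm m).1 = setAt lmL u c) := by
  intro fuel
  induction fuel with
  | zero =>
    intro lmL rm m hlen hlm hfuel
    have hu' : PySem.Raise.InRange lmL.length u := by rw [hlm]; exact hu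
    rw [binner_nonpos _ (by exact_mod_cast hfuel)]
    exact ⟨rfl, rfl, rfl, ⟨getAt lmL u, (setAt_getAt_self hu').symm⟩⟩
  | succ fuel ih =>
    intro lmL rm m hlen hlm hfuel
    have hu' : PySem.Raise.InRange lmL.length u := by rw [hlm]; exact hu
    have hzlen : (List.zipWith (· - ·) rc rm).length = rc.length := by
      simp [List.length_zipWith, hlen]
    have hbridge : ∀ v ∈ adjU,
        (decide (getAt rm v < getAt rc v)) = (decide (0 < getAt (List.zipWith (· - ·) rc rm) v)) := by
      intro v hv
      rw [getAt_zip hlen (hV v hv)]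
      exact decide_eq_decide.mpr (by omega)
    simp only [whileA]
    by_cases hcond : getAt lmL u < getAt lc u
    · rw [if_pos hcond, dfsA_spec adjU PySem.Set.empty (by intro w hw; cases hw)]
      cases hfind : adjU.find? (fun v => getAt rm v < getAt rc v) with
      | none =>
        rw [binner_nofind adjU _ _ _
          (by rw [← find?_congr_mem hbridge]; exact hfind)]
        exact ⟨rfl, rfl, rfl, ⟨getAt lmL u, (setAt_getAt_self hu').symm⟩⟩
      | some w =>
        have hwmem : w ∈ adjU := List.mem_of_find?_eq_some hfind
        have hww : PySem.Raise.InRange rc.length w := hV w hwmem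
        have hwwrm : PySem.Raise.InRange rm.length w := by rw [hlen]; exact hww
        simp only [Option.map_some]
        have hlm1 : getAt (setAt lmL u (getAt lmL u + 1)) u = getAt lmL u + 1 :=
          getAt_setAt_self _ hu'
        have hrec := ih (setAt lmL u (getAt lmL u + 1)) (setAt rm w (getAt rm w + 1))
          (m ++ [(u, w)]) (by rw [length_setAt]; exact hlen)
          (by rw [length_setAt]; exact hlm)
          (by rw [hlm1]; omega)
        rw [hlm1] at hrec
        have hzip : List.zipWith (· - ·) rc (setAt rm w (getAt rm w + 1)) =
            setAt (List.zipWith (· - ·) rc rm) w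
              (getAt (List.zipWith (· - ·) rc rm) w - 1) := zip_setAt 1 hlen hww
        have hfind' : adjU.find? (fun v => 0 < getAt (List.zipWith (· - ·) rc rm) v) = some w := by
          rw [← find?_congr_mem hbridge]; exact hfind
        have hstep := binner_step (u := u) adjU (getAt lc u - getAt lmL u)
          (List.zipWith (· - ·) rc rm) m w (by omega) hfind'
          (fun v hv => by rw [hzlen]; exact hV v hv)
        have harith : getAt lc u - (getAt lmL u + 1) = getAt lc u - getAt lmL u - 1 := by ring
        rw [harith, hzip] at hrec
        rw [hstep]
        obtain ⟨h1, h2, h3, c, h4⟩ := hrec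
        refine ⟨h1, h2, by rw [h3, length_setAt], ⟨c, ?_⟩⟩
        rw [h4, setAt_setAt _ _ hu']
    · rw [if_neg hcond, binner_nonpos _ (by omega)]
      exact ⟨rfl, rfl, rfl, ⟨getAt lmL u, (setAt_getAt_self hu').symm⟩⟩

theorem buildAdj_getD (edges : List (Int × Int)) (u : Int) :
    (buildAdj edges).getD u [] = (edges.filter (fun p => p.1 == u)).map (·.2) := by
  unfold buildAdj
  rw [PySem.Dict.getD_foldl_modify_append]
  simp

theorem adj_valid {edges : List (Int × Int)} {lc rc : List Int}
    (hpre : ∀ p ∈ edges, 0 ≤ p.1 → p.1 < lc.length → 0 < getAt lc p.1 →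
      PySem.Raise.InRange rc.length p.2)
    (u : Int) (hu0 : 0 ≤ u) (hu1 : u < lc.length) (hcap : 0 < getAt lc u) :
    ∀ v ∈ (buildAdj edges).getD u [], PySem.Raise.InRange rc.length v := by
  intro v hv
  rw [buildAdj_getD] at hv
  obtain ⟨p, hp, hpv⟩ := List.mem_map.mp hv
  have hpu : p.1 = u := beq_iff_eq.mp (List.mem_filter.mp hp).2
  have hpe := List.mem_of_mem_filter hp
  exact hpv ▸ hpre p hpe (hpu ▸ hu0) (hpu ▸ hu1) (hpu ▸ hcap)

theorem outer_eq {lc rc : List Int} {edges : List (Int × Int)}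
    (hpre : ∀ p ∈ edges, 0 ≤ p.1 → p.1 < lc.length → 0 < getAt lc p.1 →
      PySem.Raise.InRange rc.length p.2) :
    ∀ (k : Nat) (a : Int), 0 ≤ a → (lc.length : Int) - a ≤ (k : Int) →
    ∀ (lmL rm : List Int) (mA : List (Int × Int)),
    lmL.length = lc.length → rm.length = rc.length →
    (∀ j : Int, a ≤ j → j < lc.length → getAt lmL j = 0) →
    ((PySem.List.pyRange a lc.length 1).foldl
      (fun st u => whileA ((buildAdj edges).getD u []) u lc rc
          ((getAt lc u).toNat + 1) st.1 st.2.1 st.2.2) (lmL, rm, mA)).2.2 =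
    ((PySem.List.pyRange a lc.length 1).foldl
      (fun st u => binner u ((buildAdj edges).getD u []) (getAt lc u) st.1 st.2)
      (List.zipWith (· - ·) rc rm, mA)).2 := by
  intro k
  induction k with
  | zero =>
    intro a ha hk lmL rm mA hlm hlen hzero
    rw [PySem.List.pyRange_one_eq_nil (by omega)]
    rfl
  | succ k ih =>
    intro a ha hk lmL rm mA hlm hlen hzero
    by_cases hend : (lc.length : Int) ≤ a
    · rw [PySem.List.pyRange_one_eq_nil hend]
      rfl
    · rw [PySem.List.pyRange_one_cons (by omega)]
      simp only [List.foldl_cons]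
      have hu : PySem.Raise.InRange lc.length a := ⟨by omega, by omega⟩
      have hz : getAt lmL a = 0 := hzero a (le_refl a) (by omega)
      by_cases hcap : 0 < getAt lc a
      case neg =>
        -- this left vertex is a no-op on both sides
        have hAskip : whileA ((buildAdj edges).getD a []) a lc rc
            ((getAt lc a).toNat + 1) lmL rm mA = (lmL, rm, mA) := by
          simp only [whileA]
          rw [if_neg (by omega)]
        have hBskip : binner a ((buildAdj edges).getD a []) (getAt lc a)
            (List.zipWith (· - ·) rc rm) mA = (List.zipWith (· - ·) rc rm, mA) :=
          binner_nonpos _ (by omega)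
        rw [hAskip, hBskip]
        exact ih (a + 1) (by omega) (by omega) lmL rm mA hlm hlen
          (fun j hj1 hj2 => hzero j (by omega) hj2)
      case pos =>
      have hW := whileA_eq hu ((buildAdj edges).getD a [])
        (adj_valid hpre a (by omega) (by omega) hcap)
        ((getAt lc a).toNat + 1) lmL rm mA hlen hlm (by rw [hz]; omega)
      obtain ⟨h1, h2, h3, c, h4⟩ := hW
      rw [hz, sub_zero] at h1 h2
      have hrec := ih (a + 1) (by omega) (by omega)
        (whileA ((buildAdj edges).getD a []) a lc rc ((getAt lc a).toNat + 1) lmL rm mA).1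
        (whileA ((buildAdj edges).getD a []) a lc rc ((getAt lc a).toNat + 1) lmL rm mA).2.1
        (whileA ((buildAdj edges).getD a []) a lc rc ((getAt lc a).toNat + 1) lmL rm mA).2.2
        (by rw [h4, length_setAt]; exact hlm) (by rw [h3]; exact hlen)
        (by
          intro j hj1 hj2
          have hja : PySem.Raise.InRange lmL.length j := ⟨by rw [hlm]; omega, by rw [hlm]; omega⟩
          have haa : PySem.Raise.InRange lmL.length a := ⟨by rw [hlm]; omega, by rw [hlm]; omega⟩
          rw [h4, getAt_setAt _ haa hja, if_neg (by
            simp only [vIdx, if_pos ha, if_pos (by omega : (0:Int) ≤ j)]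
            omega)]
          exact hzero j (by omega) hj2)
      rw [hrec, h2, h1]

theorem zip_replicate_zero (rc : List Int) :
    List.zipWith (· - ·) rc (List.replicate rc.length 0) = rc := by
  induction rc with
  | nil => rfl
  | cons x xs ih =>
    simp only [List.length_cons, List.replicate_succ, List.zipWith_cons_cons, sub_zero, ih]

theorem getAt_replicate_zero {n : Nat} {j : Int} (h0 : 0 ≤ j) (h1 : j < n) :
    getAt (List.replicate n (0 : Int)) j = 0 := by
  have hj : PySem.Raise.InRange (List.replicate n (0 : Int)).length j := by
    simp only [List.length_replicate]; exact ⟨by omega, by exact_mod_cast h1⟩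
  rw [getAt_eq hj]
  simp

theorem final (edges : List (Int × Int)) (lc rc : List Int)
    (hpre : ∀ p ∈ edges, 0 ≤ p.1 → p.1 < lc.length → 0 < getAt lc p.1 →
      PySem.Raise.InRange rc.length p.2) :
    capacity_constrained_matching edges lc rc = capacity_constrained_matching_alt edges lc rc := by
  unfold capacity_constrained_matching capacity_constrained_matching_alt
  have h := outer_eq hpre lc.length 0 (le_refl 0) (by omega)
    (List.replicate lc.length 0) (List.replicate rc.length 0) []
    (by simp) (by simp)
    (fun j hj1 hj2 => getAt_replicate_zero hj1 (by exact_mod_cast hj2))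
  rw [zip_replicate_zero] at h
  exact h

-- ===== VERDICT (by name: the statement is the Claim_ definition above) =====
theorem capacity_constrained_matching_spec : Claim_equal_capacity_constrained_matching := by
  intro edges lc rc _ hpre
  exact final edges lc rc hpre
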